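-- pv_equiv track=rewrite | github.com/CobaltConcrete/DSAI_Nonogram | newcode.py | extract_column_clues
-- ===== SOURCE A (Python) =====
-- def extract_column_clues(grid):
--     """Extract column clues from a full grid."""
--     num_cols = len(grid[0])
--     column_clues = []
--     for col_idx in range(num_cols):
--         col = [grid[row_idx][col_idx] for row_idx in range(len(grid))]
--         clues = []
--         count = 0
--         for cell in col:
--             if cell == '#':
--                 count += 1
--             elif count > 0:
--                 clues.append(count)
--                 count = 0
--         if count > 0:
--             clues.append(count)
--         column_clues.append(clues if clues else [0])
--     return column_clues
-- ===== SOURCE B (Python) =====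
-- def _step(cnt, cl, cell):
--     if cell == '#':
--         return (cnt + 1, cl)
--     if cnt > 0:
--         return (0, cl + [cnt])
--     return (cnt, cl)
--
-- def _finish(cnt, cl):
--     if cnt > 0:
--         cl = cl + [cnt]
--     return cl if cl else [0]
--
-- def extract_column_clues(grid):
--     """Extract column clues from a full grid in one row-major sweep:
--     a vector of per-column (run counter, clues) states is updated row by row."""
--     num_cols = len(grid[0])
--     state = [(0, []) for _ in range(num_cols)]
--     for row in grid:
--         state = [_step(cnt, cl, row[c]) for c, (cnt, cl) in enumerate(state)]
--     return [_finish(cnt, cl) for cnt, cl in state]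
-- ===== Notes on version B (the rewrite author's own statement) =====
-- stated objective: alternative
-- what changed: A extracts each column and run-length-encodes it in a per-column pass (column-major, num_cols passes over the grid); B makes one row-major sweep over the grid, updating a vector of per-column (run counter, clues) states with each row, and finalizes the vector at the end.
import Mathlib
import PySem

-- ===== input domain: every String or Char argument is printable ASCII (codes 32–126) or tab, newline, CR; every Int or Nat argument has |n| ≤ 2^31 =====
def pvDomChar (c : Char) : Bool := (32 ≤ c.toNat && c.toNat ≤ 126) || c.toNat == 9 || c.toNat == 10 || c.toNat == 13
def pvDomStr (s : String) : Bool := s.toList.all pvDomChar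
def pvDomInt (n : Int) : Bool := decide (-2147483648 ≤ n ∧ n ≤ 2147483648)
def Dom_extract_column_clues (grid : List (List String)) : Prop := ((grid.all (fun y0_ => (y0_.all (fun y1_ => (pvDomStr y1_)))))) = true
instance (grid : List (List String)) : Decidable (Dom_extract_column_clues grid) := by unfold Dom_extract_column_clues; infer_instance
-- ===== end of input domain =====

-- B replaces A's column-major extraction (one run-length pass per column) by a single
-- row-major sweep updating a vector of per-column (counter, clues) states; objective: alternative.

-- ===== PORT A =====
def extract_column_clues (grid : List (List String)) : List (List Int) :=
  let num_cols := (PySem.List.pyGetD grid 0 []).length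
  (List.range num_cols).foldl (fun column_clues col_idx =>
    let col := grid.map (fun row => PySem.List.pyGetD row (Int.ofNat col_idx) "")
    let st := col.foldl (fun (p : List Int × Int) cell =>
      if cell = "#" then (p.1, p.2 + 1)
      else if p.2 > 0 then (p.1 ++ [p.2], 0)
      else p) ([], 0)
    let clues := if st.2 > 0 then st.1 ++ [st.2] else st.1
    column_clues ++ [if clues = [] then [0] else clues]) []

-- ===== PORT B =====
-- B's _step helper: advance one column's (counter, clues) state by one cell
def pvStep (cnt : Int) (cl : List Int) (cell : String) : Int × List Int :=
  if cell = "#" then (cnt + 1, cl)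
  else if cnt > 0 then (0, cl ++ [cnt])
  else (cnt, cl)

-- B's _finish helper: flush the trailing run; [0] for an all-blank column
def pvFinish (cnt : Int) (cl : List Int) : List Int :=
  let cl := if cnt > 0 then cl ++ [cnt] else cl
  if cl = [] then [0] else cl

def extract_column_clues_alt (grid : List (List String)) : List (List Int) :=
  let num_cols := (PySem.List.pyGetD grid 0 []).length
  let state := (List.range num_cols).map (fun _ => ((0 : Int), ([] : List Int)))
  let state := grid.foldl (fun state row =>
    (PySem.List.enumerate state).map (fun p =>
      pvStep p.2.1 p.2.2 (PySem.List.pyGetD row p.1 ""))) state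
  state.map (fun p => pvFinish p.1 p.2)

-- ===== PRECONDITION & SPEC =====
-- Pre_ excludes exactly the inputs where the Python A raises IndexError:
-- the empty grid (grid[0]) and ragged grids with some row shorter than row 0.
def Pre_extract_column_clues (grid : List (List String)) : Prop :=
  grid ≠ [] ∧ ∀ row ∈ grid, (PySem.List.pyGetD grid 0 []).length ≤ row.length
instance (grid : List (List String)) : Decidable (Pre_extract_column_clues grid) := by unfold Pre_extract_column_clues; infer_instance

def pvWitness_extract_column_clues : List (List String) :=
  [["#", ".", "#"], [".", "#", "#"], ["#", "#", "."]]

def Spec_extract_column_clues (grid : List (List String)) (out : List (List Int)) : Prop := out = extract_column_clues_alt grid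
instance (grid : List (List String)) (out : List (List Int)) : Decidable (Spec_extract_column_clues grid out) := by unfold Spec_extract_column_clues; infer_instance

-- ===== CLAIM (what is proved, stated in full; the proofs are below) =====
def Claim_equal_extract_column_clues : Prop := ∀ (grid : List (List String)), Dom_extract_column_clues grid → Pre_extract_column_clues grid → Spec_extract_column_clues grid (extract_column_clues grid)

-- ===== LEMMAS AND PROOFS =====

-- A's per-cell update equals B's pvStep (with the pair components swapped)
theorem pvStep_swap (p : List Int × Int) (cell : String) :
    (if cell = "#" then (p.1, p.2 + 1)
     else if p.2 > 0 then (p.1 ++ [p.2], 0)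
     else p) = ((pvStep p.2 p.1 cell).2, (pvStep p.2 p.1 cell).1) := by
  simp only [pvStep]; split_ifs <;> rfl

-- enumerate of a map over a range pairs each index with its image
theorem pvEnumerate_map_range (n : Nat) (f : Nat → Int × List Int) :
    PySem.List.enumerate ((List.range n).map f) =
      (List.range n).map (fun c => ((Int.ofNat c), f c)) := by
  induction n with
  | zero => simp
  | succ n ih =>
    rw [List.range_succ, List.map_append, PySem.List.enumerate_append, ih, List.map_append]
    simp [PySem.List.enumerate_cons, PySem.List.enumerate_nil]

-- the row-major fold of B computed columnwise: exchanging the two traversal orders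
theorem pvExchange (rows : List (List String)) (n : Nat) (f : Nat → Int × List Int) :
    rows.foldl (fun state row =>
      (PySem.List.enumerate state).map (fun p =>
        pvStep p.2.1 p.2.2 (PySem.List.pyGetD row p.1 ""))) ((List.range n).map f) =
    (List.range n).map (fun c =>
      (rows.map (fun row => PySem.List.pyGetD row (Int.ofNat c) "")).foldl
        (fun st cell => pvStep st.1 st.2 cell) (f c)) := by
  induction rows generalizing f with
  | nil => simp
  | cons row rest ih =>
    simp only [List.foldl_cons]
    rw [pvEnumerate_map_range, List.map_map]
    have : ((fun p : Int × (Int × List Int) =>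
        pvStep p.2.1 p.2.2 (PySem.List.pyGetD row p.1 "")) ∘
        (fun c : Nat => ((Int.ofNat c), f c))) =
        (fun c : Nat => pvStep (f c).1 (f c).2 (PySem.List.pyGetD row (Int.ofNat c) "")) := rfl
    rw [this, ih]
    simp [List.foldl_cons]

-- A's per-column computation equals B's column state, componentwise
theorem pvColFold (col : List String) (acc : List Int × Int) :
    col.foldl (fun (p : List Int × Int) cell =>
      if cell = "#" then (p.1, p.2 + 1)
      else if p.2 > 0 then (p.1 ++ [p.2], 0)
      else p) acc =
    ((col.foldl (fun st cell => pvStep st.1 st.2 cell) (acc.2, acc.1)).2,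
     (col.foldl (fun st cell => pvStep st.1 st.2 cell) (acc.2, acc.1)).1) := by
  induction col generalizing acc with
  | nil => rfl
  | cons cell rest ih =>
    simp only [List.foldl_cons]
    rw [pvStep_swap, ih]

-- a foldl that only appends singletons is a map over the indices
theorem pvFoldl_append_map (l : List Nat) (g : Nat → List Int) (acc : List (List Int)) :
    l.foldl (fun out c => out ++ [g c]) acc = acc ++ l.map g := by
  induction l generalizing acc with
  | nil => simp
  | cons x xs ih => simp [List.foldl_cons, ih]

-- ===== VERDICT (by name: the statement is the Claim_ definition above) =====
theorem extract_column_clues_spec : Claim_equal_extract_column_clues := by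
  intro grid _ _
  unfold Spec_extract_column_clues extract_column_clues extract_column_clues_alt
  simp only []
  rw [pvExchange, List.map_map, pvFoldl_append_map, List.nil_append]
  apply List.map_congr_left
  intro c _
  rw [pvColFold]
  simp only [Function.comp, pvFinish]
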